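-- pv_equiv track=rewrite | github.com/ricarcon/programming_exercises | 2021/orderJumbledArray.py | orderArray
-- ===== SOURCE A (Python) =====
-- def orderArray(order):
--     count = 0
--     result = [None] * len(order)
--     max = len(order) - 1
--
--     for i in range(len(order) - 1, 0 - 1, -1):
--         if order[i] == "-":
--             result[i] = count
--             count += 1
--         else:
--             result[i] = max
--             max -= 1
--
--     return result
-- ===== SOURCE B (Python) =====
-- def orderArray(order):
--     dashVal = order.count("-") - 1
--     nonVal = dashVal + 1
--     result = []
--     for x in order:
--         if x == "-":
--             result.append(dashVal)
--             dashVal -= 1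
--         else:
--             result.append(nonVal)
--             nonVal += 1
--     return result
-- ===== Notes on version B (the rewrite author's own statement) =====
-- stated objective: alternative
-- what changed: Replaces A's reverse index loop writing into a preallocated array with a precount of dashes followed by a single forward pass appending values from two derived counters (dashes count down from D-1, non-dashes count up from D).
import Mathlib
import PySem

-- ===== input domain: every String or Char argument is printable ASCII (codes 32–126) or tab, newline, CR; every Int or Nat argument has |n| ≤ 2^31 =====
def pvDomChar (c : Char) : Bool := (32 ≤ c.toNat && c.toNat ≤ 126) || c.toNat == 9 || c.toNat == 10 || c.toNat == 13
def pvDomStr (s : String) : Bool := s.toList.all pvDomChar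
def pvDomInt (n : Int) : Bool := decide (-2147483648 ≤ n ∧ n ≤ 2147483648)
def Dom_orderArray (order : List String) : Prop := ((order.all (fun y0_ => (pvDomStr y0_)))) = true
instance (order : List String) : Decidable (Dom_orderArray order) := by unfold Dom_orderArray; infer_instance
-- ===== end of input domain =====

-- B changes the decomposition: instead of A's reverse pass writing into a preallocated
-- array with counters starting at 0 and len-1, B precounts the dashes and makes one
-- forward pass appending from two derived counters (objective: alternative).

-- ===== PORT A =====
-- A iterates i from len-1 down to 0, filling result[i]; dashes get count (0,1,2,… from
-- the right), others get max (len-1, len-2,… from the right). A foldr processes the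
-- rightmost element first and builds the list by prepending, which is exactly this loop.
def orderArray (order : List String) : List Int :=
  (order.foldr
    (fun x (st : Int × Int × List Int) =>
      if x == "-" then (st.1 + 1, st.2.1, st.1 :: st.2.2)
      else (st.1, st.2.1 - 1, st.2.1 :: st.2.2))
    (0, (order.length : Int) - 1, [])).2.2

-- ===== PORT B =====
-- forward pass of Source B: dashVal counts down from D-1, nonVal counts up from D
def orderArrayGo (d n : Int) : List String → List Int
  | [] => []
  | x :: xs => if x == "-" then d :: orderArrayGo (d - 1) n xs
               else n :: orderArrayGo d (n + 1) xs

def orderArray_alt (order : List String) : List Int :=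
  orderArrayGo ((order.count "-" : Int) - 1) (order.count "-" : Int) order

-- ===== PRECONDITION & SPEC =====
def Spec_orderArray (order : List String) (out : List Int) : Prop := out = orderArray_alt order
instance (order : List String) (out : List Int) : Decidable (Spec_orderArray order out) := by unfold Spec_orderArray; infer_instance

-- ===== CLAIM (what is proved, stated in full; the proofs are below) =====
def Claim_equal_orderArray : Prop := ∀ (order : List String), Dom_orderArray order → Spec_orderArray order (orderArray order)

-- ===== LEMMAS AND PROOFS =====

theorem orderArrayGo_congr (d d' n n' : Int) (l : List String)
    (hd : d = d') (hn : n = n') : orderArrayGo d n l = orderArrayGo d' n' l := by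
  rw [hd, hn]

-- the fold's invariant: final count = number of dashes, final max = m0 - (non-dashes),
-- and the built list is B's forward pass started from the derived counters
theorem orderArray_fold_eq (l : List String) (m0 : Int) :
    l.foldr
      (fun x (st : Int × Int × List Int) =>
        if x == "-" then (st.1 + 1, st.2.1, st.1 :: st.2.2)
        else (st.1, st.2.1 - 1, st.2.1 :: st.2.2))
      (0, m0, [])
    = ((l.count "-" : Int),
       m0 - ((l.length : Int) - (l.count "-" : Int)),
       orderArrayGo ((l.count "-" : Int) - 1)
                    (m0 - ((l.length : Int) - (l.count "-" : Int)) + 1) l) := by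
  induction l with
  | nil => simp [orderArrayGo]
  | cons x xs ih =>
    simp only [List.foldr_cons, ih, List.count_cons, List.length_cons]
    by_cases hx : x = "-"
    · simp only [hx, beq_self_eq_true, if_true, orderArrayGo, Prod.mk.injEq]
      refine ⟨by push_cast; ring, by push_cast; ring, ?_⟩
      congr 1
      · push_cast; ring
      · exact orderArrayGo_congr _ _ _ _ _ (by push_cast; ring) (by push_cast; ring)
    · have hx' : (x == "-") = false := by simpa using hx
      simp only [hx', Bool.false_eq_true, if_false, orderArrayGo, Prod.mk.injEq]
      refine ⟨by push_cast; ring, by push_cast; ring, ?_⟩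
      congr 1
      · push_cast; ring
      · exact orderArrayGo_congr _ _ _ _ _ (by push_cast; ring) (by push_cast; ring)

-- ===== VERDICT (by name: the statement is the Claim_ definition above) =====
theorem orderArray_spec : Claim_equal_orderArray := by
  intro order _
  unfold Spec_orderArray orderArray orderArray_alt
  rw [orderArray_fold_eq]
  exact orderArrayGo_congr _ _ _ _ _ rfl (by ring)
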